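-- pv_equiv track=rewrite | github.com/rohitamrutkar8907/INfyTQ | info assignment/space$.py | solve
-- ===== SOURCE A (Python) =====
-- def solve(instr):
--     freqLetter = {}
--     freqDigit = {}
--     for ch in instr:
--         if((ord(ch)>=65 and ord(ch)<= 90) or ( ord(ch)>=97 and ord(ch)<=122)):
--             if ch in freqLetter:
--                 freqLetter[ch] += 1
--             elif ch!=' ':
--                 freqLetter[ch] = 1
--         elif(ord(ch)>=48 and ord(ch)<=57):
--             if ch in freqDigit:
--                 freqDigit[ch] += 1
--             elif ch!=' ':
--                 freqDigit[ch] = 1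
--     letter,digit = 0,0
--     for k,v in freqLetter.items():
--         letter = max(letter,v)
--
--     for k,v in freqDigit.items():
--         digit = max(digit,v)
--
--     index = abs(letter-digit)
--     ch = instr[index]
--
--     res = ""
--     if ch!=' ':
--         for i in instr:
--             if i!=ch and i !=' ':
--                 res += i
--             if i == " ":
--                 res += "$"
--     else:
--         for i in instr:
--             if i ==' ':
--                 res += "$"
--             else:
--                 res += i
--
--     return res
-- ===== SOURCE B (Python) =====
-- def solve(instr):
--     # recursive select-count-remove maximum instead of dict counting; join-comprehension output
--     def peak(s):
--         if not s:
--             return 0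
--         c = s[0]
--         return max(s.count(c), peak([x for x in s if x != c]))
--     letter = peak([c for c in instr if 65 <= ord(c) <= 90 or 97 <= ord(c) <= 122])
--     digit = peak([c for c in instr if 48 <= ord(c) <= 57])
--     ch = instr[abs(letter - digit)]
--     if ch == ' ':
--         return ''.join('$' if c == ' ' else c for c in instr)
--     return ''.join('$' if c == ' ' else ('' if c == ch else c) for c in instr)
-- ===== Notes on version B (the rewrite author's own statement) =====
-- stated objective: alternative
-- what changed: B computes each max frequency by a recursive select-first-count-remove descent over the filtered character list (no frequency dicts at all) and builds the output with join comprehensions instead of A's accumulator loops.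
import Mathlib
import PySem

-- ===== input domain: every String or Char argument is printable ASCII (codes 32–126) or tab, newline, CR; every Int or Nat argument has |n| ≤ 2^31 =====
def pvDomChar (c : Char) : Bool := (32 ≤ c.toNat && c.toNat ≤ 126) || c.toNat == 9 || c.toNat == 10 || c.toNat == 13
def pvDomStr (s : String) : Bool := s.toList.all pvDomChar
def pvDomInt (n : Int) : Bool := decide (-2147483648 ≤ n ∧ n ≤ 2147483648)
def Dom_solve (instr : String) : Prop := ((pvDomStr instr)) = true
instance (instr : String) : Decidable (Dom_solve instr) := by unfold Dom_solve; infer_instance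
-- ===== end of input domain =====

-- B replaces A's one-pass frequency dicts by a recursive select-count-remove maximum and A's
-- accumulator result loops by join comprehensions (objective: alternative; not faster).

-- ord-range classifiers (both Pythons test the same ord ranges)
def pvIsL (c : Char) : Bool := (65 ≤ c.toNat && c.toNat ≤ 90) || (97 ≤ c.toNat && c.toNat ≤ 122)
def pvIsD (c : Char) : Bool := 48 ≤ c.toNat && c.toNat ≤ 57

-- ===== PORT A =====
def pvStepA (p : PySem.Dict Char Int × PySem.Dict Char Int) (c : Char) :
    PySem.Dict Char Int × PySem.Dict Char Int :=
  if pvIsL c then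
    (if p.1.contains c then (p.1.modify c 0 (· + 1), p.2)
     else if c ≠ ' ' then (p.1.insert c 1, p.2) else p)
  else if pvIsD c then
    (if p.2.contains c then (p.1, p.2.modify c 0 (· + 1))
     else if c ≠ ' ' then (p.1, p.2.insert c 1) else p)
  else p

def solve (instr : String) : String :=
  let cs := instr.toList
  let fr := cs.foldl pvStepA (PySem.Dict.empty, PySem.Dict.empty)
  let letter := fr.1.items.foldl (fun acc kv => max acc kv.2) 0
  let digit := fr.2.items.foldl (fun acc kv => max acc kv.2) 0
  match PySem.List.pyGet? cs |letter - digit| with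
  | none => ""   -- IndexError in Python: excluded by Pre_solve
  | some ch =>
    if ch ≠ ' ' then
      String.ofList (cs.foldl (fun res i =>
        (if i ≠ ch ∧ i ≠ ' ' then res ++ [i] else res) ++ (if i = ' ' then ['$'] else [])) [])
    else
      String.ofList (cs.foldl (fun res i => if i = ' ' then res ++ ['$'] else res ++ [i]) [])

-- ===== PORT B =====
-- B's recursive helper: max(count of first element, peak of the rest with that element removed)
def pvPeak (s : List Char) : Int :=
  match s with
  | [] => 0
  | c :: t => max ((c :: t).count c : Int) (pvPeak ((c :: t).filter (fun x => x ≠ c)))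
termination_by s.length
decreasing_by
  simp only [List.filter_cons, ne_eq, not_true_eq_false, decide_false, List.length_cons]
  exact Nat.lt_succ_of_le (List.length_filter_le _ _)

def solve_alt (instr : String) : String :=
  let cs := instr.toList
  let letter := pvPeak (cs.filter pvIsL)
  let digit := pvPeak (cs.filter pvIsD)
  match PySem.List.pyGet? cs |letter - digit| with
  | none => ""   -- IndexError in Python: excluded by Pre_solve
  | some ch =>
    if ch = ' ' then String.ofList (cs.map (fun c => if c = ' ' then '$' else c))
    else String.ofList (cs.flatMap (fun c => if c = ' ' then ['$'] else if c = ch then [] else [c]))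

-- ===== PRECONDITION & SPEC =====
-- the maximal frequency of a character of class p in cs (0 if none occurs)
def pvMaxFreq (p : Char → Bool) (cs : List Char) : Int :=
  ((cs.filter p).map (fun c => (cs.count c : Int))).foldl max 0

-- Pre_ excludes exactly the inputs on which Python's instr[abs(letter-digit)] raises IndexError.
def Pre_solve (instr : String) : Prop :=
  (pvMaxFreq pvIsL instr.toList - pvMaxFreq pvIsD instr.toList).natAbs < instr.toList.length
instance (instr : String) : Decidable (Pre_solve instr) := by unfold Pre_solve; infer_instance

def pvWitness_solve : String := "aa1 b"

def Spec_solve (instr : String) (out : String) : Prop := out = solve_alt instr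
instance (instr : String) (out : String) : Decidable (Spec_solve instr out) := by unfold Spec_solve; infer_instance

-- ===== CLAIM (what is proved, stated in full; the proofs are below) =====
def Claim_equal_solve : Prop := ∀ (instr : String), Dom_solve instr → Pre_solve instr → Spec_solve instr (solve instr)

-- ===== LEMMAS AND PROOFS =====

-- filter/map-update/find? bookkeeping on raw item lists
theorem pv_filter_mapUpd_of_neg {ν : Type} (xs : List (Char × ν)) (q : Char → Bool) (c : Char) (v : ν)
    (hq : q c = false) :
    (xs.map (fun p => if p.1 == c then (c, v) else p)).filter (fun p => q p.1)
      = xs.filter (fun p => q p.1) := by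
  induction xs with
  | nil => rfl
  | cons p t ih =>
    simp only [List.map_cons, List.filter_cons, beq_iff_eq] at ih ⊢
    by_cases h : p.1 = c
    · simp [h, hq, ih]
    · by_cases hqp : q p.1 <;> simp [h, hqp, ih]

theorem pv_filter_mapUpd_of_pos {ν : Type} (xs : List (Char × ν)) (q : Char → Bool) (c : Char) (v : ν)
    (hq : q c = true) :
    (xs.map (fun p => if p.1 == c then (c, v) else p)).filter (fun p => q p.1)
      = (xs.filter (fun p => q p.1)).map (fun p => if p.1 == c then (c, v) else p) := by
  induction xs with
  | nil => rfl
  | cons p t ih =>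
    simp only [List.map_cons, List.filter_cons, beq_iff_eq] at ih ⊢
    by_cases h : p.1 = c
    · simp [h, hq, ih]
    · by_cases hqp : q p.1 <;> simp [h, hqp, ih]

theorem pv_find?_filter {ν : Type} (xs : List (Char × ν)) (q : Char → Bool) (c : Char)
    (hq : q c = true) :
    (xs.filter (fun p => q p.1)).find? (fun p => p.1 == c) = xs.find? (fun p => p.1 == c) := by
  induction xs with
  | nil => rfl
  | cons p t ih =>
    by_cases h : p.1 = c
    · simp [h, hq]
    · by_cases hqp : q p.1 <;> simp [hqp, h, ih]

theorem pv_any_filter {ν : Type} (xs : List (Char × ν)) (q : Char → Bool) (c : Char)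
    (hq : q c = true) :
    (xs.filter (fun p => q p.1)).any (fun p => p.1 == c) = xs.any (fun p => p.1 == c) := by
  induction xs with
  | nil => rfl
  | cons p t ih =>
    by_cases h : p.1 = c
    · simp [h, hq]
    · by_cases hqp : q p.1 <;> simp [hqp, h, ih]

theorem pv_not_space_of_isL (c : Char) (h : pvIsL c = true) : c ≠ ' ' := by
  intro hc; subst hc; simp [pvIsL] at h

theorem pv_isD_false_of_isL (c : Char) (h : pvIsL c = true) : pvIsD c = false := by
  simp only [pvIsL, Bool.or_eq_true, Bool.and_eq_true, decide_eq_true_eq] at h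
  simp only [pvIsD, Bool.and_eq_false_iff, decide_eq_false_iff_not, not_le]
  omega

-- the letter dict (resp. digit dict) of A's first loop is the letter-filtered (resp. digit-filtered) counter
theorem pv_dicts_eq (cs : List Char) :
    (cs.foldl pvStepA (PySem.Dict.empty, PySem.Dict.empty)).1.items
        = (PySem.Dict.counter cs).items.filter (fun kv => pvIsL kv.1)
    ∧ (cs.foldl pvStepA (PySem.Dict.empty, PySem.Dict.empty)).2.items
        = (PySem.Dict.counter cs).items.filter (fun kv => pvIsD kv.1) := by
  induction cs using List.reverseRecOn with
  | nil => constructor <;> rfl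
  | append_singleton l c ih =>
    obtain ⟨ih1, ih2⟩ := ih
    rw [List.foldl_append, List.foldl_cons, List.foldl_nil,
      PySem.Dict.counter_append_singleton, PySem.Dict.modify]
    set d := l.foldl pvStepA (PySem.Dict.empty, PySem.Dict.empty) with hd
    set m := PySem.Dict.counter l with hm
    have hcont : ∀ (q : Char → Bool), q c = true →
        ((PySem.Dict.mk (m.items.filter (fun kv => q kv.1))).contains c) = m.contains c := by
      intro q hq
      simp only [PySem.Dict.contains]
      exact pv_any_filter m.items q c hq
    have hgetD : ∀ (q : Char → Bool), q c = true →
        ((PySem.Dict.mk (m.items.filter (fun kv => q kv.1))).getD c 0) = m.getD c 0 := by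
      intro q hq
      simp only [PySem.Dict.getD, PySem.Dict.get?]
      rw [pv_find?_filter m.items q c hq]
    by_cases hL : pvIsL c = true
    · have hD : pvIsD c = false := pv_isD_false_of_isL c hL
      have hc1 : d.1.contains c = m.contains c := by
        have := hcont (fun x => pvIsL x) hL
        simpa [PySem.Dict.contains, ih1] using this
      have hg1 : d.1.getD c 0 = m.getD c 0 := by
        have := hgetD (fun x => pvIsL x) hL
        simpa [PySem.Dict.getD, PySem.Dict.get?, ih1] using this
      simp only [pvStepA, hL, if_true]
      by_cases hc : m.contains c = true
      · rw [if_pos (by rw [hc1]; exact hc)]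
        refine ⟨?_, ?_⟩
        · rw [PySem.Dict.modify, PySem.Dict.items_insert_of_contains _ _ (by rw [hc1]; exact hc),
            PySem.Dict.items_insert_of_contains _ _ hc, ih1, hg1,
            pv_filter_mapUpd_of_pos _ _ _ _ hL]
        · rw [PySem.Dict.items_insert_of_contains _ _ hc,
            pv_filter_mapUpd_of_neg _ _ _ _ hD]
          exact ih2
      · have hcf : m.contains c = false := by simpa using hc
        rw [if_neg (by rw [hc1, hcf]; simp), if_pos (by simp [pv_not_space_of_isL c hL])]
        have hg0 : m.getD c 0 = 0 := PySem.Dict.getD_of_not_contains _ _ hcf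
        refine ⟨?_, ?_⟩
        · rw [PySem.Dict.items_insert_of_not_contains _ _ (by rw [hc1]; exact hcf),
            PySem.Dict.items_insert_of_not_contains _ _ hcf, ih1,
            List.filter_append]
          simp [hL, hg0]
        · rw [PySem.Dict.items_insert_of_not_contains _ _ hcf, List.filter_append]
          simp [hD, ih2]
    · have hLf : pvIsL c = false := by simpa using hL
      by_cases hDt : pvIsD c = true
      · have hc2 : d.2.contains c = m.contains c := by
          have := hcont (fun x => pvIsD x) hDt
          simpa [PySem.Dict.contains, ih2] using this
        have hg2 : d.2.getD c 0 = m.getD c 0 := by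
          have := hgetD (fun x => pvIsD x) hDt
          simpa [PySem.Dict.getD, PySem.Dict.get?, ih2] using this
        have hsp : c ≠ ' ' := by intro h; subst h; simp [pvIsD] at hDt
        simp only [pvStepA, hLf, Bool.false_eq_true, if_false, hDt, if_true]
        by_cases hc : m.contains c = true
        · rw [if_pos (by rw [hc2]; exact hc)]
          refine ⟨?_, ?_⟩
          · rw [PySem.Dict.items_insert_of_contains _ _ hc,
              pv_filter_mapUpd_of_neg _ _ _ _ hLf]
            exact ih1
          · rw [PySem.Dict.modify, PySem.Dict.items_insert_of_contains _ _ (by rw [hc2]; exact hc),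
              PySem.Dict.items_insert_of_contains _ _ hc, ih2, hg2,
              pv_filter_mapUpd_of_pos _ _ _ _ hDt]
        · have hcf : m.contains c = false := by simpa using hc
          rw [if_neg (by rw [hc2, hcf]; simp), if_pos (by simp [hsp])]
          have hg0 : m.getD c 0 = 0 := PySem.Dict.getD_of_not_contains _ _ hcf
          refine ⟨?_, ?_⟩
          · rw [PySem.Dict.items_insert_of_not_contains _ _ hcf, List.filter_append]
            simp [hLf, ih1]
          · rw [PySem.Dict.items_insert_of_not_contains _ _ (by rw [hc2]; exact hcf),
              PySem.Dict.items_insert_of_not_contains _ _ hcf, ih2,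
              List.filter_append]
            simp [hDt, hg0]
      · have hDf : pvIsD c = false := by simpa using hDt
        simp only [pvStepA, hLf, Bool.false_eq_true, if_false, hDf]
        by_cases hc : m.contains c = true
        · rw [PySem.Dict.items_insert_of_contains _ _ hc,
            pv_filter_mapUpd_of_neg _ _ _ _ hLf, pv_filter_mapUpd_of_neg _ _ _ _ hDf]
          exact ⟨ih1, ih2⟩
        · have hcf : m.contains c = false := by simpa using hc
          rw [PySem.Dict.items_insert_of_not_contains _ _ hcf, List.filter_append]
          simp [hLf, hDf, ih1, ih2]

-- ---- max-of-a-list toolkit (foldl max 0) ----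
def pvMx (vs : List Int) : Int := vs.foldl max 0

theorem pv_foldl_max_swap (vs : List Int) : ∀ (a b : Int),
    vs.foldl max (max a b) = max b (vs.foldl max a) := by
  induction vs with
  | nil => intro a b; simp [max_comm]
  | cons v t ih =>
    intro a b
    simp only [List.foldl_cons]
    rw [show max (max a b) v = max (max a v) b by
      rw [max_assoc, max_assoc, max_comm b v], ih]

theorem pv_mx_cons (v : Int) (vs : List Int) : pvMx (v :: vs) = max v (pvMx vs) := by
  simp only [pvMx, List.foldl_cons]
  exact pv_foldl_max_swap vs 0 v

theorem pv_mx_nonneg (vs : List Int) : 0 ≤ pvMx vs := by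
  induction vs with
  | nil => simp [pvMx]
  | cons v t ih => rw [pv_mx_cons]; exact le_trans ih (le_max_right _ _)

theorem pv_le_mx (vs : List Int) (x : Int) (hx : x ∈ vs) : x ≤ pvMx vs := by
  induction vs with
  | nil => simp at hx
  | cons v t ih =>
    rw [pv_mx_cons]
    rcases List.mem_cons.1 hx with h | h
    · exact h ▸ le_max_left _ _
    · exact le_trans (ih h) (le_max_right _ _)

theorem pv_mx_mem (vs : List Int) : pvMx vs = 0 ∨ pvMx vs ∈ vs := by
  induction vs with
  | nil => exact Or.inl rfl
  | cons v t ih =>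
    rw [pv_mx_cons]
    by_cases h : v ≤ pvMx t
    · rw [max_eq_right h]
      rcases ih with h0 | hm
      · exact Or.inl h0
      · exact Or.inr (List.mem_cons_of_mem _ hm)
    · rw [max_eq_left (le_of_not_ge h)]
      exact Or.inr (List.mem_cons_self)

theorem pv_mx_ext (xs ys : List Int) (h : ∀ x, x ∈ xs ↔ x ∈ ys) : pvMx xs = pvMx ys := by
  apply le_antisymm
  · rcases pv_mx_mem xs with h0 | hm
    · rw [h0]; exact pv_mx_nonneg ys
    · exact pv_le_mx ys _ ((h _).1 hm)
  · rcases pv_mx_mem ys with h0 | hm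
    · rw [h0]; exact pv_mx_nonneg xs
    · exact pv_le_mx xs _ ((h _).2 hm)

-- count is unchanged by filtering away a different character
theorem pv_count_filter_ne (t : List Char) (c x : Char) (hx : x ≠ c) :
    (t.filter (fun y => y ≠ c)).count x = t.count x := by
  exact List.count_filter (by simp [hx])

-- B's recursive peak computes the maximum multiplicity of its argument
theorem pv_peak_eq_mx (l : List Char) :
    pvPeak l = pvMx (l.map (fun c => (l.count c : Int))) := by
  induction hn : l.length using Nat.strong_induction_on generalizing l with
  | _ n ih =>
    cases l with
    | nil => simp [pvPeak, pvMx]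
    | cons c t =>
      have hr : ((c :: t).filter (fun x => x ≠ c)) = t.filter (fun x => x ≠ c) := by
        simp
      have hlen : (t.filter (fun x => x ≠ c)).length < n := by
        subst hn
        simp only [List.length_cons]
        exact Nat.lt_succ_of_le (List.length_filter_le _ _)
      have ihr := ih _ hlen (t.filter (fun x => x ≠ c)) rfl
      rw [pvPeak, hr, ihr]
      set r := t.filter (fun x => x ≠ c) with hrdef
      have key : pvMx ((c :: t).map (fun x => ((c :: t).count x : Int)))
          = pvMx ((((c :: t).count c : Int)) :: r.map (fun x => (r.count x : Int))) := by
        apply pv_mx_ext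
        intro v
        constructor
        · intro hv
          rcases List.mem_map.1 hv with ⟨x, hxmem, hvx⟩
          by_cases hxc : x = c
          · subst hxc; exact hvx ▸ List.mem_cons_self
          · have hxt : x ∈ t := by
              rcases List.mem_cons.1 hxmem with h | h
              · exact absurd h hxc
              · exact h
            apply List.mem_cons_of_mem
            apply List.mem_map.2
            refine ⟨x, ?_, ?_⟩
            · rw [hrdef]; exact List.mem_filter.2 ⟨hxt, by simp [hxc]⟩
            · rw [← hvx]
              congr 1
              rw [hrdef, pv_count_filter_ne t c x hxc, List.count_cons]
              simp [Ne.symm hxc]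
        · intro hv
          rcases List.mem_cons.1 hv with h | h
          · exact h ▸ List.mem_map.2 ⟨c, List.mem_cons_self, rfl⟩
          · rcases List.mem_map.1 h with ⟨x, hxmem, hvx⟩
            have hxprop := List.mem_filter.1 (hrdef ▸ hxmem)
            have hxc : x ≠ c := by simpa using hxprop.2
            apply List.mem_map.2
            refine ⟨x, List.mem_cons_of_mem _ hxprop.1, ?_⟩
            rw [← hvx]
            congr 1
            rw [hrdef, pv_count_filter_ne t c x hxc, List.count_cons]
            simp [Ne.symm hxc]
      rw [key, pv_mx_cons]

-- bridge: B's peak over the filtered string = A's fold of max over its dict's items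
theorem pv_peak_eq_fold (cs : List Char) (p : Char → Bool) :
    pvPeak (cs.filter p)
      = ((PySem.Dict.counter cs).items.filter (fun kv => p kv.1)).foldl
          (fun acc kv => max acc kv.2) 0 := by
  have hfold : ((PySem.Dict.counter cs).items.filter (fun kv => p kv.1)).foldl
      (fun acc kv => max acc kv.2) 0
      = pvMx (((PySem.Dict.counter cs).items.filter (fun kv => p kv.1)).map (fun kv => kv.2)) := by
    rw [pvMx, List.foldl_map]
  rw [hfold, pv_peak_eq_mx]
  apply pv_mx_ext
  intro v
  constructor
  · intro hv
    rcases List.mem_map.1 hv with ⟨x, hx, hvx⟩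
    have hmem := List.mem_filter.1 hx
    apply List.mem_map.2
    refine ⟨(x, (cs.count x : Int)), ?_, ?_⟩
    · apply List.mem_filter.2
      refine ⟨?_, hmem.2⟩
      rw [PySem.Dict.items_counter]
      exact List.mem_map.2 ⟨x, (PySem.Set.mem_ofList cs x).2 hmem.1, rfl⟩
    · rw [← hvx]
      show ((cs.count x : Int)) = ((cs.filter p).count x : Int)
      exact_mod_cast (List.count_filter hmem.2).symm
  · intro hv
    rcases List.mem_map.1 hv with ⟨kv, hkv, hvv⟩
    have hkvm := List.mem_filter.1 hkv
    rw [PySem.Dict.items_counter] at hkvm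
    rcases List.mem_map.1 hkvm.1 with ⟨x, hxS, hxeq⟩
    subst hxeq
    have hp : p x = true := hkvm.2
    apply List.mem_map.2
    refine ⟨x, List.mem_filter.2 ⟨(PySem.Set.mem_ofList cs x).1 hxS, hp⟩, ?_⟩
    rw [← hvv]
    show (((cs.filter p).count x : Int)) = (cs.count x : Int)
    exact_mod_cast List.count_filter hp

-- A's result loop (ch ≠ ' ' case) as a flatMap
theorem pv_outA_ne (cs : List Char) (ch : Char) (hch : ch ≠ ' ') :
    cs.foldl (fun res i =>
        (if i ≠ ch ∧ i ≠ ' ' then res ++ [i] else res) ++ (if i = ' ' then ['$'] else [])) []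
      = cs.flatMap (fun c => if c = ' ' then ['$'] else if c = ch then [] else [c]) := by
  have hstep : (fun (res : List Char) (i : Char) =>
      (if i ≠ ch ∧ i ≠ ' ' then res ++ [i] else res) ++ (if i = ' ' then ['$'] else []))
      = fun res i => res ++ ((if i ≠ ch ∧ i ≠ ' ' then [i] else []) ++ (if i = ' ' then ['$'] else [])) := by
    funext res i; split_ifs <;> simp
  rw [hstep, PySem.List.foldl_append_eq_flatMap]
  simp only [List.nil_append]
  congr 1
  funext c
  by_cases h2 : c = ' '
  · simp [h2, Ne.symm hch]
  · by_cases h1 : c = ch <;> simp [h1, h2, hch]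

-- A's result loop (ch = ' ' case) equals B's per-character substitution
theorem pv_outA_sp (cs : List Char) :
    cs.foldl (fun res i => if i = ' ' then res ++ ['$'] else res ++ [i]) []
      = cs.map (fun c => if c = ' ' then '$' else c) := by
  have hstep : (fun (res : List Char) (i : Char) => if i = ' ' then res ++ ['$'] else res ++ [i])
      = fun res i => res ++ (if i = ' ' then ['$'] else [i]) := by
    funext res i; split_ifs <;> simp
  rw [hstep, PySem.List.foldl_append_eq_flatMap]
  induction cs with
  | nil => rfl
  | cons c t ih =>
    simp only [List.flatMap_cons, List.map_cons, List.nil_append] at ih ⊢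
    by_cases h : c = ' ' <;> simp [h, ih]

-- ===== VERDICT (by name: the statement is the Claim_ definition above) =====
theorem solve_spec : Claim_equal_solve := by
  intro instr _ _
  unfold Spec_solve
  simp only [solve, solve_alt]
  obtain ⟨h1, h2⟩ := pv_dicts_eq instr.toList
  rw [h1, h2, ← pv_peak_eq_fold instr.toList pvIsL, ← pv_peak_eq_fold instr.toList pvIsD]
  cases hg : PySem.List.pyGet? instr.toList
      |pvPeak (instr.toList.filter pvIsL) - pvPeak (instr.toList.filter pvIsD)| with
  | none => rfl
  | some ch =>
    by_cases hch : ch = ' '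
    · subst hch
      simp only [ne_eq, not_true_eq_false, if_false, if_true]
      rw [pv_outA_sp]
    · simp only [ne_eq, hch, not_false_eq_true, if_true, if_false]
      rw [pv_outA_ne instr.toList ch hch]
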